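-- pv_equiv track=rewrite | github.com/kim-limit/Algorithm-Python | Samsung/boj_17140.py | count
-- ===== SOURCE A (Python) =====
-- def count(list): # 계산 함수
--     count_list = []
--     for i in list:
--         if i == 0: # 0은 안셈
--             continue
--         if (i, list.count(i)) not in count_list: # 처음 세는것만
--             count_list.append((i, list.count(i))) # 숫자와 개수
--
--     count_list.sort(key=lambda x : (x[1], x[0])) # 우선순위를 개수먼저
--
--     result = []
--     for i in range(len(count_list)):
--         result.append(count_list[i][0])
--         result.append(count_list[i][1])
--
--     return result[:100] # 100개 까지만
-- ===== SOURCE B (Python) =====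
-- def count(list):
--     vals = sorted(v for v in list if v != 0)
--     pairs = []
--     prev = None
--     run = 0
--     for v in vals:
--         if v == prev:
--             run += 1
--         else:
--             if prev is not None:
--                 pairs.append((prev, run))
--             prev = v
--             run = 1
--     if prev is not None:
--         pairs.append((prev, run))
--     pairs.sort(key=lambda x: (x[1], x[0]))
--     result = []
--     for v, c in pairs:
--         result.append(v)
--         result.append(c)
--     return result[:100]
-- ===== Notes on version B (the rewrite author's own statement) =====
-- stated objective: faster
-- what changed: Replaces the quadratic scan (list.count per element plus a linear membership test on the pair list) with run-length encoding over one sorted copy of the nonzero values: sort, walk once comparing each element to its predecessor to emit (value, run) pairs at run boundaries, then sort the pairs by (count, value) and flatten.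
import Mathlib
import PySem

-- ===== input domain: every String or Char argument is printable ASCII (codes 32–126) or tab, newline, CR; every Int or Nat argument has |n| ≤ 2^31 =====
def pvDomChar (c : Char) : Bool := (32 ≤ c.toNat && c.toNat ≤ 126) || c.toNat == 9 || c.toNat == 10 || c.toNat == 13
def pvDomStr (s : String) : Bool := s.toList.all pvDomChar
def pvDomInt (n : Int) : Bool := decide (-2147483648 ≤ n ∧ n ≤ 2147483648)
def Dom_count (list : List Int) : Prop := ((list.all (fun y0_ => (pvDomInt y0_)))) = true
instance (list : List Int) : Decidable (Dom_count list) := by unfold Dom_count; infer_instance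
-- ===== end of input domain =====

-- B counts by run-length encoding over one sorted copy of the nonzero values instead of A's repeated list.count scans; same output, measurably faster.

-- ===== PORT A =====
def count (list : List Int) : List Int :=
  let count_list := list.foldl (fun acc i =>
    if i == 0 then acc
    else if (i, (PySem.List.count list i : Int)) ∈ acc then acc
    else acc ++ [(i, (PySem.List.count list i : Int))]) []
  let count_list := PySem.List.sorted2 count_list (fun x => x.2) (fun x => x.1)
  let result := (PySem.List.pyRange 0 (PySem.List.len count_list)).foldl
    (fun r i => r ++ [(PySem.List.pyGetD count_list i (0, 0)).1,
                      (PySem.List.pyGetD count_list i (0, 0)).2]) []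
  PySem.List.slice result none (some 100)

-- ===== PORT B =====
-- one step of Source B's run-length loop: state = (pairs, prev, run)
def rlStep (st : List (Int × Int) × Option Int × Int) (v : Int) :
    List (Int × Int) × Option Int × Int :=
  if some v == st.2.1 then (st.1, st.2.1, st.2.2 + 1)
  else ((match st.2.1 with | some p => st.1 ++ [(p, st.2.2)] | none => st.1), some v, 1)

-- the trailing 'if prev is not None: pairs.append((prev, run))'
def rlFinish (st : List (Int × Int) × Option Int × Int) : List (Int × Int) :=
  match st.2.1 with | some p => st.1 ++ [(p, st.2.2)] | none => st.1

def count_alt (list : List Int) : List Int :=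
  let vals := PySem.List.sorted (list.filter (fun v => v != 0)) (fun x => x)
  let pairs := rlFinish (vals.foldl rlStep ([], none, 0))
  let pairs := PySem.List.sorted2 pairs (fun x => x.2) (fun x => x.1)
  let result := pairs.foldl (fun r p => r ++ [p.1, p.2]) []
  PySem.List.slice result none (some 100)

-- ===== PRECONDITION & SPEC =====
def Spec_count (list : List Int) (out : List Int) : Prop := out = count_alt list
instance (list : List Int) (out : List Int) : Decidable (Spec_count list out) := by unfold Spec_count; infer_instance

-- ===== CLAIM =====
def Claim_equal_count : Prop := ∀ (list : List Int), Dom_count list → Spec_count list (count list)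

-- ===== LEMMAS AND PROOFS =====

-- canonical pair list: distinct values in first-occurrence order with their counts
def pvC (s : List Int) : List (Int × Int) :=
  (PySem.Set.ofList s).map (fun k => (k, (s.count k : Int)))

-- pure recursive form of Source B's run-length loop
def pvRle (p : Int) (n : Int) : List Int → List (Int × Int)
  | [] => [(p, n)]
  | x :: t => if x = p then pvRle p (n + 1) t else (p, n) :: pvRle x 1 t

-- Source B's fold computes pvRle
theorem rl_loop (s : List Int) (pairs : List (Int × Int)) (p n : Int) :
    rlFinish (s.foldl rlStep (pairs, some p, n)) = pairs ++ pvRle p n s := by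
  induction s generalizing pairs p n with
  | nil => simp [rlFinish, pvRle]
  | cons x t ih =>
    by_cases h : x = p
    · simp [rlStep, h, pvRle, ih]
    · simp [rlStep, h, pvRle, ih, List.append_assoc]

-- gluing a fresh minimal head onto the canonical pair list
theorem pvC_glue (x : Int) (t : List Int) :
    ((x, 1 + (t.count x : Int)) ::
      (PySem.Set.ofList (t.filter (fun y => y != x))).map (fun k => (k, (t.count k : Int)))).Perm
    (pvC (x :: t)) := by
  unfold pvC
  rw [PySem.Set.ofList_cons]
  simp only [List.map_cons]
  have e0 : (((x :: t).count x : Nat) : Int) = (t.count x : Int) + 1 := by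
    rw [List.count_cons_self]; push_cast; ring
  have e1 : 1 + (t.count x : Int) = (t.count x : Int) + 1 := by ring
  rw [e0, e1]
  have hmapc : (PySem.Set.discard (PySem.Set.ofList t) x).map
      (fun k => (k, ((x :: t).count k : Int)))
      = (PySem.Set.discard (PySem.Set.ofList t) x).map (fun k => (k, (t.count k : Int))) := by
    apply List.map_congr_left
    intro k hk
    have hne : ¬ (x = k) := fun hh => ((PySem.Set.mem_discard _ _ _).mp hk).2 hh.symm
    simp [hne]
  rw [hmapc]
  have hperm : (PySem.Set.ofList (t.filter (fun y => y != x))).Perm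
      (PySem.Set.discard (PySem.Set.ofList t) x) := by
    apply (List.perm_ext_iff_of_nodup (PySem.Set.nodup_ofList _)
      (PySem.Set.nodup_discard _ _ (PySem.Set.nodup_ofList _))).mpr
    intro a
    simp [PySem.Set.mem_ofList, PySem.Set.mem_discard, List.mem_filter]
  exact (hperm.map _).cons _

-- run-length encoding of a sorted tail is the canonical pair list (up to permutation)
theorem pvRle_perm (s : List Int) (p n : Int)
    (hs : s.Pairwise (· ≤ ·)) (hp : ∀ x ∈ s, p ≤ x) :
    (pvRle p n s).Perm ((p, n + (s.count p : Int)) ::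
      (PySem.Set.ofList (s.filter (fun y => y != p))).map (fun k => (k, (s.count k : Int)))) := by
  induction s generalizing p n with
  | nil => simp [pvRle]
  | cons x t ih =>
    have ht : t.Pairwise (· ≤ ·) := hs.tail
    have hxt : ∀ y ∈ t, x ≤ y := fun y hy => (List.pairwise_cons.mp hs).1 y hy
    simp only [pvRle]
    by_cases h : x = p
    · rw [if_pos h]
      subst h
      have e1 : (n : Int) + (((x :: t).count x : Nat) : Int) = (n + 1) + (t.count x : Int) := by
        rw [List.count_cons_self]; push_cast; ring
      have e2 : (x :: t).filter (fun y => y != x) = t.filter (fun y => y != x) := by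
        simp
      rw [e1, e2]
      have e3 : (PySem.Set.ofList (t.filter (fun y => y != x))).map
          (fun k => (k, ((x :: t).count k : Int)))
          = (PySem.Set.ofList (t.filter (fun y => y != x))).map
          (fun k => (k, (t.count k : Int))) := by
        apply List.map_congr_left
        intro k hk
        have hne : ¬ (x = k) := fun hh => by
          simpa [hh] using (List.mem_filter.mp ((PySem.Set.mem_ofList _ _).mp hk)).2
        simp [hne]
      rw [e3]
      exact ih x (n + 1) ht hxt
    · rw [if_neg h]
      have hpx : p < x := lt_of_le_of_ne (hp x (by simp)) (Ne.symm h)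
      have hnot : p ∉ x :: t := by
        intro hmem
        rcases List.mem_cons.mp hmem with h1 | h1
        · exact h h1.symm
        · exact absurd (hxt p h1) (by omega)
      have hc0 : (((x :: t).count p : Nat) : Int) = 0 := by
        rw [List.count_eq_zero.mpr hnot]; rfl
      have hfil : (x :: t).filter (fun y => y != p) = x :: t := by
        apply List.filter_eq_self.mpr
        intro a ha
        simp only [bne_iff_ne, ne_eq]
        intro hap
        exact hnot (hap ▸ ha)
      rw [hc0, hfil, add_zero]
      exact ((ih x 1 ht hxt).trans (pvC_glue x t)).cons (p, n)

-- a sorted value list's run-length fold yields its canonical pair list, up to permutation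
theorem rl_pvC (vals : List Int) (hsorted : vals.Pairwise (· ≤ ·)) :
    (rlFinish (vals.foldl rlStep ([], none, 0))).Perm (pvC vals) := by
  cases vals with
  | nil => simp [rlFinish, pvC, PySem.Set.ofList_nil]
  | cons v rest =>
    have hstep : rlStep ([], none, 0) v = ([], some v, 1) := by
      simp [rlStep]
    have hfold : rlFinish ((v :: rest).foldl rlStep ([], none, 0)) = pvRle v 1 rest := by
      rw [List.foldl_cons, hstep, rl_loop]
      simp
    rw [hfold]
    have hrest : rest.Pairwise (· ≤ ·) := hsorted.tail
    have hvle : ∀ y ∈ rest, v ≤ y := fun y hy => (List.pairwise_cons.mp hsorted).1 y hy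
    exact (pvRle_perm rest v 1 hrest hvle).trans (pvC_glue v rest)

-- A's first loop, generalized: starting from a Nodup set S rendered as (k, c k) pairs,
-- it appends exactly the fresh nonzero values in first-occurrence order.
theorem countA_loop (c : Int → Int) (l : List Int) (S : PySem.Set Int) (hS : S.Nodup) :
    l.foldl (fun acc i =>
      if i == 0 then acc
      else if (i, c i) ∈ acc then acc
      else acc ++ [(i, c i)]) (S.map (fun k => (k, c k)))
    = (S.update (l.filter (fun v => v != 0))).map (fun k => (k, c k)) := by
  induction l generalizing S with
  | nil => simp [PySem.Set.update]
  | cons x l ih =>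
    by_cases hx : x = 0
    · simpa [hx] using ih S hS
    · have hmem : ((x, c x) ∈ S.map (fun k => (k, c k))) ↔ x ∈ S := by
        simp only [List.mem_map, Prod.mk.injEq]
        constructor
        · rintro ⟨a, ha, h1, _⟩; exact h1 ▸ ha
        · intro h; exact ⟨x, h, rfl, rfl⟩
      have hxb : (x != 0) = true := by simp [hx]
      have hxe : ¬ ((x == 0) = true) := by simp [hx]
      simp only [List.foldl_cons, List.filter_cons, hxb, if_true, if_neg hxe,
        PySem.Set.update_cons]
      by_cases hS' : x ∈ S
      · rw [if_pos (hmem.mpr hS'), PySem.Set.add_of_mem hS']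
        exact ih S hS
      · rw [if_neg (fun h => hS' (hmem.mp h))]
        have : S.map (fun k => (k, c k)) ++ [(x, c x)]
            = (S.add x).map (fun k => (k, c k)) := by
          simp [PySem.Set.add_of_not_mem hS']
        rw [this]
        exact ih (S.add x) (PySem.Set.nodup_add S x hS)

-- sorted2 with keys (snd, fst) is sorted with the lexicographic key
theorem sorted2_eq_sorted_lex (xs : List (Int × Int)) :
    PySem.List.sorted2 xs (fun x => x.2) (fun x => x.1)
      = PySem.List.sorted xs (fun x => toLex (x.2, x.1)) := by
  rw [PySem.List.sorted_eq_foldl_insertBy]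
  show xs.foldl (fun acc x => PySem.List.insertBy
      (fun a b : Int × Int => decide (a.2 < b.2) || (!decide (b.2 < a.2) && decide (a.1 < b.1)))
      x acc) []
    = xs.foldl (fun acc x => PySem.List.insertBy
      (fun a b : Int × Int => decide (toLex (a.2, a.1) < toLex (b.2, b.1))) x acc) []
  have hbe : (fun a b : Int × Int =>
      decide (a.2 < b.2) || (!decide (b.2 < a.2) && decide (a.1 < b.1)))
      = (fun a b : Int × Int => decide (toLex (a.2, a.1) < toLex (b.2, b.1))) := by
    funext a b
    by_cases h1 : a.2 < b.2 <;> by_cases h2 : b.2 < a.2 <;> by_cases h3 : a.1 < b.1 <;>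
      simp [h1, h2, h3, Prod.Lex.lt_iff] <;> omega
  rw [hbe]

-- the key (count, value) is injective on pairs
theorem lexkey_inj : Function.Injective (fun x : Int × Int => toLex (x.2, x.1)) := by
  intro a b h
  have := toLex.injective h
  exact Prod.ext (congrArg Prod.snd this) (congrArg Prod.fst this)

-- the two pair lists are permutations of one another
theorem pairs_perm (list : List Int) :
    (rlFinish ((PySem.List.sorted (list.filter (fun v => v != 0)) (fun x => x)).foldl
        rlStep ([], none, 0))).Perm
      (list.foldl (fun acc i =>
        if i == 0 then acc
        else if (i, (PySem.List.count list i : Int)) ∈ acc then acc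
        else acc ++ [(i, (PySem.List.count list i : Int))]) []) := by
  have hA : list.foldl (fun acc i =>
      if i == 0 then acc
      else if (i, (PySem.List.count list i : Int)) ∈ acc then acc
      else acc ++ [(i, (PySem.List.count list i : Int))]) []
      = (PySem.Set.ofList (list.filter (fun v => v != 0))).map
          (fun k => (k, (PySem.List.count list k : Int))) := by
    have := countA_loop (fun k => (PySem.List.count list k : Int)) list [] List.nodup_nil
    simpa [PySem.Set.update_nil_left] using this
  rw [hA]
  have hvperm : (PySem.List.sorted (list.filter (fun v => v != 0)) (fun x => x)).Perm
      (list.filter (fun v => v != 0)) :=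
    PySem.List.sorted_perm _ (fun x => x) false
  have hCA : (pvC (PySem.List.sorted (list.filter (fun v => v != 0)) (fun x => x))).Perm
      ((PySem.Set.ofList (list.filter (fun v => v != 0))).map
        (fun k => (k, (PySem.List.count list k : Int)))) := by
    unfold pvC
    have hcongr : (PySem.Set.ofList (PySem.List.sorted (list.filter (fun v => v != 0))
          (fun x => x))).map
        (fun k => (k, ((PySem.List.sorted (list.filter (fun v => v != 0))
          (fun x => x)).count k : Int)))
        = (PySem.Set.ofList (PySem.List.sorted (list.filter (fun v => v != 0))
          (fun x => x))).map (fun k => (k, (PySem.List.count list k : Int))) := by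
      apply List.map_congr_left
      intro k hk
      have hkv : k ∈ PySem.List.sorted (list.filter (fun v => v != 0)) (fun x => x) :=
        (PySem.Set.mem_ofList _ _).mp hk
      have hknz : k ∈ list.filter (fun v => v != 0) := hvperm.mem_iff.mp hkv
      have h1 := hvperm.count_eq k
      have h2 : (list.filter (fun v => v != 0)).count k = list.count k := by
        rw [List.count_filter (p := fun v => v != 0) (a := k) (l := list) ((List.mem_filter.mp hknz).2)]
      rw [PySem.List.count_eq, h1, h2]
    rw [hcongr]
    apply List.Perm.map
    apply (List.perm_ext_iff_of_nodup (PySem.Set.nodup_ofList _) (PySem.Set.nodup_ofList _)).mpr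
    intro a
    simp [PySem.Set.mem_ofList, hvperm.mem_iff]
  have hsorted : (PySem.List.sorted (list.filter (fun v => v != 0)) (fun x => x)).Pairwise
      (· ≤ ·) := by
    simpa using PySem.List.sorted_pairwise (list.filter (fun v => v != 0)) (fun x => x)
  exact (rl_pvC _ hsorted).trans hCA

theorem count_spec_aux (list : List Int) : count list = count_alt list := by
  have hs : PySem.List.sorted2
      (rlFinish ((PySem.List.sorted (list.filter (fun v => v != 0)) (fun x => x)).foldl
        rlStep ([], none, 0))) (fun x => x.2) (fun x => x.1)
      = PySem.List.sorted2 (list.foldl (fun acc i =>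
          if i == 0 then acc
          else if (i, (PySem.List.count list i : Int)) ∈ acc then acc
          else acc ++ [(i, (PySem.List.count list i : Int))]) []) (fun x => x.2) (fun x => x.1) := by
    rw [sorted2_eq_sorted_lex, sorted2_eq_sorted_lex]
    exact PySem.List.sorted_eq_sorted_of_perm _ _ _ lexkey_inj (pairs_perm list)
  have h4 : ∀ (P : List (Int × Int)),
      (PySem.List.pyRange 0 (PySem.List.len P)).foldl
        (fun r i => r ++ [(PySem.List.pyGetD P i (0, 0)).1, (PySem.List.pyGetD P i (0, 0)).2]) []
      = P.foldl (fun r p => r ++ [p.1, p.2]) [] := by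
    intro P
    have := PySem.List.foldl_pyRange_pyGetD P (0, 0)
      (fun (r : List Int) (p : Int × Int) => r ++ [p.1, p.2]) [] (a := 0) le_rfl
    simpa using this
  unfold count count_alt
  simp only [hs, h4]

-- ===== VERDICT =====
theorem count_spec : Claim_equal_count := by
  intro list _
  unfold Spec_count
  exact count_spec_aux list
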